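-- pv_equiv track=rewrite | github.com/tntcannon5000/ALU-Timing-Tool-Rework | test.py | correct_ocr_sequence_non_decreasing
-- ===== SOURCE A (Python) =====
-- def correct_ocr_sequence_non_decreasing(
--     ocr_values: list[str],
--     default_first_value: int = 1
-- ) -> list[str]:
--     """
--     Corrects errors in a list of OCR'd numerical strings, assuming
--     the underlying sequence is non-decreasing (can stay the same or increase).
--
--     - If a value is parsable and >= the previously corrected value, it's accepted.
--     - If a value is parsable but < the previously corrected value, it's an error
--       and corrected to the previously corrected value.
--     - If a value is not parsable:
--         - If it's the first value, it's corrected to `default_first_value`.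
--         - Otherwise, it's corrected to the previously corrected value.
--
--     Args:
--         ocr_values: A list of strings, where each string is expected
--                     to represent an integer (or could be empty/invalid).
--         default_first_value: The integer value to use if the very first
--                              OCR value is unparsable.
--
--     Returns:
--         A new list of strings with corrected values, maintaining
--         a non-decreasing sequence.
--     """
--     if not ocr_values:
--         return []
--
--     corrected_values_str = []
--     # Initialize with a value that would be less than any typical first number,
--     # or handle the first element explicitly.
--     # Using -1 assumes positive integers; adjust if 0 or negative numbers are possible.
--     previous_corrected_num_int = -1 # Sentinel: Not yet properly initialized
--
--     for i, current_val_str in enumerate(ocr_values):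
--         current_val_int = None
--         is_parsable = False
--
--         if current_val_str and current_val_str.strip():
--             try:
--                 current_val_int = int(current_val_str)
--                 is_parsable = True
--             except ValueError:
--                 # Not a valid integer, is_parsable remains False
--                 pass
--
--         corrected_num_to_add_int = -1 # Placeholder
--
--         if i == 0: # First element
--             if is_parsable:
--                 corrected_num_to_add_int = current_val_int
--             else:
--                 # First element is not parsable, use default
--                 corrected_num_to_add_int = default_first_value
--             previous_corrected_num_int = corrected_num_to_add_int
--         else: # Subsequent elements
--             if is_parsable:
--                 if current_val_int >= previous_corrected_num_int:
--                     # Parsable and non-decreasing: accept it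
--                     corrected_num_to_add_int = current_val_int
--                     previous_corrected_num_int = current_val_int
--                 else:
--                     # Parsable but a dip (e.g., 8 then 3): OCR error, assume it was the previous value
--                     corrected_num_to_add_int = previous_corrected_num_int
--                     # previous_corrected_num_int remains the same (the higher value)
--             else:
--                 # Not parsable: assume it's the same as the last known good value
--                 corrected_num_to_add_int = previous_corrected_num_int
--                 # previous_corrected_num_int remains the same
--
--         corrected_values_str.append(str(corrected_num_to_add_int))
--
--     return corrected_values_str
-- ===== SOURCE B (Python) =====
-- def correct_ocr_sequence_non_decreasing(ocr_values, default_first_value=1):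
--     """Divide-and-conquer reformulation: the answer is the prefix maximum of
--     the parsed values (unparsable entries contribute the seed, which the
--     prefix already contains, so they change nothing).  Prefix maxima are
--     computed by a parallel-prefix-style recursion: split in half, solve both
--     halves, then lift the right half by the left half's total maximum."""
--     def parse(s):
--         if s and s.strip():
--             try:
--                 return int(s)
--             except ValueError:
--                 return None
--         return None
--
--     def prefmax(l):
--         if len(l) <= 1:
--             return l[:]
--         m = len(l) // 2
--         left = prefmax(l[:m])
--         right = prefmax(l[m:])
--         t = left[-1]
--         return left + [max(t, x) for x in right]
--
--     parsed = [parse(s) for s in ocr_values]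
--     if not parsed:
--         return []
--     seed = parsed[0] if parsed[0] is not None else default_first_value
--     vals = [seed] + [p if p is not None else seed for p in parsed[1:]]
--     return [str(x) for x in prefmax(vals)]
-- ===== Notes on version B (the rewrite author's own statement) =====
-- stated objective: alternative
-- what changed: Replaces A's stateful left-to-right enumerate loop (sentinel + previous-value mutation) by a parse pass followed by a divide-and-conquer parallel-prefix computation of the prefix maxima: split the parsed values in half, recurse on each half, then lift the right half's results by the left half's last (total) maximum; no running state is threaded through the output.
import Mathlib
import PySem

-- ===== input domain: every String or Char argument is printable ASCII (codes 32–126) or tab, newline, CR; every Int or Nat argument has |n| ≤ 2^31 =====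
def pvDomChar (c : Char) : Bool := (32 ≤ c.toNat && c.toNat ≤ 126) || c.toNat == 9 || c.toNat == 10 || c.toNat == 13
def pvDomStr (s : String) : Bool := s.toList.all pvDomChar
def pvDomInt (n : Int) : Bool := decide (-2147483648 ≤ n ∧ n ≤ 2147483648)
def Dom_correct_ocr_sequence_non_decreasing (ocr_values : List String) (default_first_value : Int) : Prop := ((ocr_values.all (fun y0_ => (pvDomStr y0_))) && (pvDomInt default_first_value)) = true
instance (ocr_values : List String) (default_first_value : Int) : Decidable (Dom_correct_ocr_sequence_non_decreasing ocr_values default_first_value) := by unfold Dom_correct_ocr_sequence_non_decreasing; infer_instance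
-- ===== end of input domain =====

-- B replaces A's stateful enumerate loop by a parse pass and a divide-and-conquer
-- prefix-maximum recursion (an alternative, stateless decomposition of the same task).

-- ===== PORT A =====
-- `current_val_str and current_val_str.strip()` truthiness, then try int(...)
def pvParseA (s : String) : Option Int :=
  if s ≠ "" ∧ PySem.Str.strip s ≠ "" then PySem.Int.ofStr? s else none

-- the loop body: state = (previous_corrected_num_int, corrected_values_str)
def pvStepA (default_first_value : Int) (st : Int × List String) (p : Int × String) : Int × List String :=
  let pv := pvParseA p.2
  let res : Int × Int :=
    if p.1 = 0 then
      match pv with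
      | some v => (v, v)
      | none => (default_first_value, default_first_value)
    else
      match pv with
      | some v => if v ≥ st.1 then (v, v) else (st.1, st.1)
      | none => (st.1, st.1)
  (res.2, st.2 ++ [PySem.Int.toStr res.1])

def correct_ocr_sequence_non_decreasing (ocr_values : List String) (default_first_value : Int) : List String :=
  if ocr_values = [] then []
  else ((PySem.List.enumerate ocr_values 0).foldl (pvStepA default_first_value) (-1, [])).2

-- ===== PORT B =====
def pvParseB (s : String) : Option Int :=
  if s ≠ "" ∧ PySem.Str.strip s ≠ "" then PySem.Int.ofStr? s else none

-- prefmax: split in half, recurse, lift the right half by the left half's last value.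
-- `left[-1]` is ported by pyGet?; the recursion only reaches it with `left` nonempty,
-- so the `.getD 0` default is never used.  l[:m] / l[m:] are List.take / List.drop
-- (PySem.List.slice_to_natCast / slice_from_natCast).
def pvPrefMax (l : List Int) : List Int :=
  if l.length ≤ 1 then l
  else
    let m := l.length / 2
    let left := pvPrefMax (l.take m)
    let right := pvPrefMax (l.drop m)
    let t := (PySem.List.pyGet? left (-1)).getD 0
    left ++ right.map (fun x => max t x)
termination_by l.length
decreasing_by
  · simp only [List.length_take]; omega
  · simp only [List.length_drop]; omega

def correct_ocr_sequence_non_decreasing_alt (ocr_values : List String) (default_first_value : Int) : List String :=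
  let parsed := ocr_values.map pvParseB
  match parsed with
  | [] => []
  | p0 :: rest =>
    let seed := p0.getD default_first_value
    let vals := seed :: rest.map (fun p => p.getD seed)
    (pvPrefMax vals).map PySem.Int.toStr

-- ===== PRECONDITION & SPEC =====
def Spec_correct_ocr_sequence_non_decreasing (ocr_values : List String) (default_first_value : Int) (out : List String) : Prop := out = correct_ocr_sequence_non_decreasing_alt ocr_values default_first_value
instance (ocr_values : List String) (default_first_value : Int) (out : List String) : Decidable (Spec_correct_ocr_sequence_non_decreasing ocr_values default_first_value out) := by unfold Spec_correct_ocr_sequence_non_decreasing; infer_instance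

-- ===== CLAIM (what is proved, stated in full; the proofs are below) =====
def Claim_equal_correct_ocr_sequence_non_decreasing : Prop := ∀ (ocr_values : List String) (default_first_value : Int), Dom_correct_ocr_sequence_non_decreasing ocr_values default_first_value → Spec_correct_ocr_sequence_non_decreasing ocr_values default_first_value (correct_ocr_sequence_non_decreasing ocr_values default_first_value)

-- ===== LEMMAS AND PROOFS =====
-- proof helpers: the corrected value after a non-first element; the sequential scan;
-- the structural prefix-maximum and the total maximum of a nonempty list
def pvNext (prev : Int) : Option Int → Int
  | some v => if v > prev then v else prev
  | none => prev

def pvScan (cur : Int) : List (Option Int) → List Int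
  | [] => []
  | p :: rest =>
      let cur' := pvNext cur p
      cur' :: pvScan cur' rest

def pvScanMax : List Int → List Int
  | [] => []
  | x :: t => x :: (pvScanMax t).map (fun y => max x y)

def pvFoldMax : List Int → Int
  | [] => 0
  | x :: t => t.foldl max x

def pvIter (cur : Int) : List Int → List Int
  | [] => []
  | x :: t => max cur x :: pvIter (max cur x) t

-- ==== A's loop is the sequential scan ====
lemma pvStepA_zero (d prev : Int) (acc : List String) (x : String) :
    pvStepA d (prev, acc) (0, x)
      = ((pvParseA x).getD d, acc ++ [PySem.Int.toStr ((pvParseA x).getD d)]) := by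
  cases h : pvParseA x <;> simp [pvStepA, h]

lemma pvStepA_pos (d prev : Int) (acc : List String) (s : Int) (x : String) (hs : s ≠ 0) :
    pvStepA d (prev, acc) (s, x)
      = (pvNext prev (pvParseA x), acc ++ [PySem.Int.toStr (pvNext prev (pvParseA x))]) := by
  cases h : pvParseA x with
  | none => simp [pvStepA, pvNext, h, if_neg hs]
  | some v =>
    simp only [pvStepA, pvNext, h, if_neg hs]
    rcases lt_trichotomy v prev with hc | hc | hc
    · rw [if_neg (by omega), if_neg (by omega)]
    · rw [if_pos (by omega), if_neg (by omega)]; subst hc; rfl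
    · rw [if_pos (by omega), if_pos (by omega)]

lemma pv_tail_eq (d : Int) (l : List String) : ∀ (s : Int), 1 ≤ s → ∀ (prev : Int) (acc : List String),
    ((PySem.List.enumerate l s).foldl (pvStepA d) (prev, acc)).2
      = acc ++ (pvScan prev (l.map pvParseA)).map PySem.Int.toStr := by
  induction l with
  | nil => intro s hs prev acc; simp [PySem.List.enumerate, pvScan]
  | cons x xs ih =>
    intro s hs prev acc
    rw [PySem.List.enumerate_cons, List.foldl_cons, pvStepA_pos d prev acc s x (by omega),
      ih (s + 1) (by omega)]
    simp [pvScan]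

-- ==== the divide-and-conquer prefmax is the structural prefix maximum ====
lemma pvScanMax_ne_nil (x : Int) (t : List Int) : pvScanMax (x :: t) ≠ [] := by
  simp [pvScanMax]

lemma pvFoldMax_cons (x y : Int) (u : List Int) :
    pvFoldMax (x :: y :: u) = max x (pvFoldMax (y :: u)) := by
  simp only [pvFoldMax, List.foldl_cons]
  exact List.foldl_assoc

lemma pvScanMax_last : ∀ (t : List Int) (x : Int),
    (pvScanMax (x :: t)).getLast? = some (pvFoldMax (x :: t)) := by
  intro t
  induction t with
  | nil => intro x; simp [pvScanMax, pvFoldMax]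
  | cons y u ih =>
    intro x
    show (x :: (pvScanMax (y :: u)).map (fun z => max x z)).getLast? = _
    rw [List.getLast?_cons, List.getLast?_map, ih y]
    simp [pvFoldMax_cons]

lemma pvMap_max_max (c d : Int) (S : List Int) :
    (S.map (fun z => max d z)).map (fun z => max c z) = S.map (fun z => max (max c d) z) := by
  rw [List.map_map]
  apply List.map_congr_left
  intro z _
  simp [Function.comp_apply, max_assoc]

lemma pvScanMax_append : ∀ (a b : List Int), a ≠ [] →
    pvScanMax (a ++ b) = pvScanMax a ++ (pvScanMax b).map (fun y => max (pvFoldMax a) y) := by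
  intro a
  induction a with
  | nil => intro b h; exact absurd rfl h
  | cons x a' ih =>
    intro b _
    cases a' with
    | nil => simp [pvScanMax, pvFoldMax]
    | cons y u =>
      calc pvScanMax ((x :: y :: u) ++ b)
          = x :: (pvScanMax ((y :: u) ++ b)).map (fun z => max x z) := rfl
        _ = x :: ((pvScanMax (y :: u)
              ++ (pvScanMax b).map (fun z => max (pvFoldMax (y :: u)) z)).map (fun z => max x z)) := by
            rw [ih b (by simp)]
        _ = (x :: (pvScanMax (y :: u)).map (fun z => max x z))
              ++ (pvScanMax b).map (fun z => max (pvFoldMax (x :: y :: u)) z) := by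
            rw [List.map_append, pvMap_max_max, pvFoldMax_cons]
            simp
        _ = pvScanMax (x :: y :: u) ++ (pvScanMax b).map (fun z => max (pvFoldMax (x :: y :: u)) z) := rfl

lemma pvPrefMax_eq_scanMax (l : List Int) : pvPrefMax l = pvScanMax l := by
  induction l using pvPrefMax.induct with
  | case1 l h =>
    rw [pvPrefMax, if_pos h]
    match l, h with
    | [], _ => rfl
    | [x], _ => simp [pvScanMax]
  | case2 l h m ihl ihr =>
    simp only [show m = l.length / 2 from rfl] at ihl ihr
    rw [pvPrefMax, if_neg h]
    show pvPrefMax (l.take (l.length / 2))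
        ++ (pvPrefMax (l.drop (l.length / 2))).map
          (fun x => max ((PySem.List.pyGet? (pvPrefMax (l.take (l.length / 2))) (-1)).getD 0) x)
        = pvScanMax l
    have htake : l.take (l.length / 2) ≠ [] := by
      intro hc
      have := congrArg List.length hc
      simp only [List.length_take, List.length_nil] at this
      omega
    obtain ⟨x0, t0, hx⟩ : ∃ x0 t0, l.take (l.length / 2) = x0 :: t0 := by
      cases hc : l.take (l.length / 2) with
      | nil => exact absurd hc htake
      | cons a b => exact ⟨a, b, rfl⟩
    have hlast : (pvScanMax (l.take (l.length / 2))).getLast?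
        = some (pvFoldMax (l.take (l.length / 2))) := by
      rw [hx]; exact pvScanMax_last t0 x0
    rw [ihl, ihr,
      PySem.List.pyGet?_neg_ofNat _ 1 (by omega)
        (List.length_pos_of_ne_nil (by rw [hx]; exact pvScanMax_ne_nil x0 t0)),
      ← List.getLast?_eq_getElem?, hlast]
    simp only [Option.getD_some]
    rw [← pvScanMax_append _ _ htake, List.take_append_drop]

-- ==== the structural prefix maximum is the sequential scan ====
lemma pvScanMax_map_max : ∀ (l : List Int) (c : Int),
    (pvScanMax l).map (fun y => max c y) = pvIter c l := by
  intro l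
  induction l with
  | nil => intro c; rfl
  | cons x t ih =>
    intro c
    simp only [pvScanMax, List.map_cons, List.map_map, pvIter]
    congr 1
    rw [← ih (max c x)]
    apply List.map_congr_left
    intro z _
    simp [Function.comp_apply, max_assoc]

lemma pvIter_getD_eq_scan : ∀ (rest : List (Option Int)) (seed cur : Int), seed ≤ cur →
    pvIter cur (rest.map (fun p => p.getD seed)) = pvScan cur rest := by
  intro rest
  induction rest with
  | nil => intro seed cur _; rfl
  | cons p t ih =>
    intro seed cur hsc
    cases p with
    | none =>
      have hmax : max cur seed = cur := by omega
      simp only [List.map_cons, Option.getD_none, pvIter, pvScan, pvNext, hmax]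
      exact congrArg _ (ih seed cur hsc)
    | some v =>
      have hmax : max cur v = pvNext cur (some v) := by simp [pvNext, max_def]; omega
      simp only [List.map_cons, Option.getD_some, pvIter, pvScan, hmax]
      exact congrArg _ (ih seed (pvNext cur (some v)) (by simp [pvNext] at *; omega))

-- ===== VERDICT (by name: the statement is the Claim_ definition above) =====
theorem correct_ocr_sequence_non_decreasing_spec : Claim_equal_correct_ocr_sequence_non_decreasing := by
  intro ocr_values d _
  unfold Spec_correct_ocr_sequence_non_decreasing
  cases ocr_values with
  | nil => rfl
  | cons x xs =>
    have hPB : pvParseB = pvParseA := rfl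
    unfold correct_ocr_sequence_non_decreasing correct_ocr_sequence_non_decreasing_alt
    rw [if_neg (by simp), PySem.List.enumerate_cons, List.foldl_cons, pvStepA_zero,
      pv_tail_eq d xs (0 + 1) (by omega)]
    simp only [List.map_cons, hPB, List.nil_append]
    set seed := (pvParseA x).getD d with hseed
    set rest := xs.map pvParseA with hrest
    rw [pvPrefMax_eq_scanMax]
    show _ = (pvScanMax (seed :: rest.map (fun p => p.getD seed))).map PySem.Int.toStr
    rw [show pvScanMax (seed :: rest.map (fun p => p.getD seed))
        = seed :: (pvScanMax (rest.map (fun p => p.getD seed))).map (fun y => max seed y) from rfl,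
      pvScanMax_map_max, pvIter_getD_eq_scan rest seed seed le_rfl]
    simp
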